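-- pv_equiv track=rewrite | github.com/nidhiatwork/Python_Coding_Practice | 30DayLeetcodeChallenge_April/Week2/14_stringShift.py | stringShift_UsingAllShifts
-- ===== SOURCE A (Python) =====
-- def stringShift_UsingAllShifts(s, shift):
--     for shft in shift:
--         direction, amount = shft[0], shft[1]
--         if direction == 0:
--             while amount:
--                 s = s[1:]+s[0]
--                 amount-=1
--         else:
--             while amount:
--                 s = s[-1]+s[:-1]
--                 amount-=1
--     return s
--
-- s = "abcdefg"
-- ===== SOURCE B (Python) =====
-- def stringShift_UsingAllShifts(s, shift):
--     net = 0
--     for shft in shift: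
--         if shft[0] == 0:
--             net -= shft[1]
--         else:
--             net += shft[1]
--     if not s:
--         return s
--     cut = len(s) - net % len(s)
--     return s[cut:] + s[:cut]
-- ===== Notes on version B (the rewrite author's own statement) =====
-- stated objective: faster
-- what changed: Instead of rotating one character at a time for every unit of every shift amount, B sums the net signed shift in one pass, reduces it modulo len(s) and does a single slice rotation; intended as faster (asymptotic; a timing run saw A time out where B returned but could not measure a ratio).
import Mathlib
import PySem

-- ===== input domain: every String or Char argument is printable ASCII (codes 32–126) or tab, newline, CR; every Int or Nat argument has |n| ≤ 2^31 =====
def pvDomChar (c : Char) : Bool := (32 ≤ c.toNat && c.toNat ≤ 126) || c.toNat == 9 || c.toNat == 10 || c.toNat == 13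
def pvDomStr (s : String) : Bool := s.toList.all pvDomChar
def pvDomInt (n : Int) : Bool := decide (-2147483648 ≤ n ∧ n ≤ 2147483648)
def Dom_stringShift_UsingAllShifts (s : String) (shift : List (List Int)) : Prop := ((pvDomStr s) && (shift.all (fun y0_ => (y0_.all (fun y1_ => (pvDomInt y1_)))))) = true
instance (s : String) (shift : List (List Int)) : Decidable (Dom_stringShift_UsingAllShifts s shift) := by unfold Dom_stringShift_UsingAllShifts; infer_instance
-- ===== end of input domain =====

-- B replaces A's character-by-character repeated rotations with a single slice rotation by the
-- net shift modulo the length; intended as faster (asymptotic) — a timing run saw A time out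
-- where B returned but could not measure a clean ratio.


-- ===== PORT A =====
-- One step of A's left-rotation loop: s = s[1:] + s[0]
def pvRotL : List Char → List Char
  | [] => []            -- Python raises IndexError (s[0] on "") here; excluded by Pre_
  | c :: r => r ++ [c]

-- One step of A's right-rotation loop: s = s[-1] + s[:-1]
def pvRotR (l : List Char) : List Char :=
  match l.getLast? with
  | none => []          -- Python raises IndexError (s[-1] on "") here; excluded by Pre_
  | some c => c :: l.dropLast

-- The body of A's 'for shft in shift' loop. Each 'while amount' loop iterates the one-step
-- rotation; 'amount.toNat' as iteration count is exact for amount ≥ 0 (Pre_; for a negative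
-- amount Python diverges, excluded by Pre_).
def pvStepA (cs : List Char) (p : List Int) : List Char :=
  match PySem.List.pyGet? p 0, PySem.List.pyGet? p 1 with
  | some d, some a => if d == 0 then pvRotL^[a.toNat] cs else pvRotR^[a.toNat] cs
  | _, _ => cs          -- Python raises IndexError (shft[0]/shft[1] missing); excluded by Pre_

def stringShift_UsingAllShifts (s : String) (shift : List (List Int)) : String :=
  String.ofList (List.foldl pvStepA s.toList shift)

-- ===== PORT B =====
-- B's accumulation loop body: net -= shft[1] for a left shift, net += shft[1] for a right one.
def pvNetStep (acc : Int) (p : List Int) : Int :=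
  match PySem.List.pyGet? p 0, PySem.List.pyGet? p 1 with
  | some d, some a => if d == 0 then acc - a else acc + a
  | _, _ => acc         -- Python B raises IndexError here too; excluded by Pre_

def pvNet (shift : List (List Int)) : Int := List.foldl pvNetStep 0 shift

def stringShift_UsingAllShifts_alt (s : String) (shift : List (List Int)) : String :=
  let cs := s.toList
  if cs.isEmpty then s
  else
    let cut := cs.length - (PySem.Int.mod (pvNet shift) (cs.length : Int)).toNat
    String.ofList (cs.drop cut ++ cs.take cut)

-- ===== PRECONDITION & SPEC =====
-- Pre_ excludes exactly the inputs on which A does not return normally: a shift entry with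
-- fewer than 2 elements (IndexError), a negative amount (the 'while amount' loop diverges),
-- or a positive amount on the empty string (IndexError on s[0]/s[-1]).
def Pre_stringShift_UsingAllShifts (s : String) (shift : List (List Int)) : Prop :=
  ∀ p ∈ shift, 2 ≤ p.length ∧ 0 ≤ p.getD 1 0 ∧ (s.toList ≠ [] ∨ p.getD 1 0 = 0)
instance (s : String) (shift : List (List Int)) : Decidable (Pre_stringShift_UsingAllShifts s shift) := by
  unfold Pre_stringShift_UsingAllShifts; infer_instance

def pvWitness_stringShift_UsingAllShifts : String × List (List Int) := ("abc", [[0, 2], [1, 5]])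

def Spec_stringShift_UsingAllShifts (s : String) (shift : List (List Int)) (out : String) : Prop := out = stringShift_UsingAllShifts_alt s shift
instance (s : String) (shift : List (List Int)) (out : String) : Decidable (Spec_stringShift_UsingAllShifts s shift out) := by unfold Spec_stringShift_UsingAllShifts; infer_instance

-- ===== CLAIM (what is proved, stated in full; the proofs are below) =====
def Claim_equal_stringShift_UsingAllShifts : Prop := ∀ (s : String) (shift : List (List Int)), Dom_stringShift_UsingAllShifts s shift → Pre_stringShift_UsingAllShifts s shift → Spec_stringShift_UsingAllShifts s shift (stringShift_UsingAllShifts s shift)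

-- ===== LEMMAS AND PROOFS =====

-- A's contribution of one shift entry, expressed as a LEFT rotation count on a string of length n.
def pvContrib (n : Nat) (p : List Int) : Nat :=
  match PySem.List.pyGet? p 0, PySem.List.pyGet? p 1 with
  | some d, some a => if d == 0 then a.toNat else a.toNat * (n - 1)
  | _, _ => 0

def pvAmtL (n : Nat) (shift : List (List Int)) : Nat := (shift.map (pvContrib n)).sum

-- The net signed right shift of B, as a plain sum.
def pvNetSum (shift : List (List Int)) : Int :=
  (shift.map (fun p =>
    match PySem.List.pyGet? p 0, PySem.List.pyGet? p 1 with
    | some d, some a => if d == 0 then -a else a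
    | _, _ => 0)).sum

theorem pvRotL_eq (cs : List Char) : pvRotL cs = cs.rotate 1 := by
  cases cs with
  | nil => simp [pvRotL]
  | cons c r => rw [List.rotate_cons_succ]; simp [pvRotL]

theorem pvRotR_eq (cs : List Char) : pvRotR cs = cs.rotate (cs.length - 1) := by
  cases h : cs.getLast? with
  | none => have : cs = [] := by simpa using h
            subst this; simp [pvRotR]
  | some c =>
    obtain ⟨l', a, rfl⟩ := (List.eq_nil_or_concat cs).resolve_left (by rintro rfl; simp at h)
    simp at h
    subst h
    rw [List.rotate_eq_drop_append_take (by simp)]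
    simp [pvRotR]

theorem pvRotL_iter (a : Nat) (cs : List Char) : pvRotL^[a] cs = cs.rotate a := by
  induction a generalizing cs with
  | zero => simp
  | succ a ih =>
    rw [Function.iterate_succ_apply, ih, pvRotL_eq, List.rotate_rotate]
    rw [Nat.add_comm]

theorem pvRotR_iter (a : Nat) (cs : List Char) : pvRotR^[a] cs = cs.rotate (a * (cs.length - 1)) := by
  induction a generalizing cs with
  | zero => simp
  | succ a ih =>
    rw [Function.iterate_succ_apply, ih, pvRotR_eq, List.length_rotate, List.rotate_rotate]
    congr 1
    ring

theorem pvStepA_eq (cs : List Char) (p : List Int) :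
    pvStepA cs p = cs.rotate (pvContrib cs.length p) := by
  unfold pvStepA pvContrib
  cases h0 : PySem.List.pyGet? p 0 with
  | none => simp
  | some d =>
    cases h1 : PySem.List.pyGet? p 1 with
    | none => simp
    | some a =>
      by_cases hd : d == 0 <;> simp [hd, pvRotL_iter, pvRotR_iter]

theorem pvFoldl_stepA (shift : List (List Int)) :
    ∀ cs : List Char, List.foldl pvStepA cs shift = cs.rotate (pvAmtL cs.length shift) := by
  induction shift with
  | nil => intro cs; simp [pvAmtL]
  | cons p rest ih =>
    intro cs
    have hlen : (pvStepA cs p).length = cs.length := by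
      rw [pvStepA_eq, List.length_rotate]
    rw [List.foldl_cons, ih, hlen, pvStepA_eq, List.rotate_rotate]
    simp [pvAmtL]

theorem pvNet_foldl (shift : List (List Int)) :
    ∀ acc : Int, List.foldl pvNetStep acc shift = acc + pvNetSum shift := by
  induction shift with
  | nil => intro acc; simp [pvNetSum]
  | cons p rest ih =>
    intro acc
    rw [List.foldl_cons, ih]
    simp only [pvNetSum, List.map_cons, List.sum_cons]
    unfold pvNetStep
    cases PySem.List.pyGet? p 0 with
    | none => simp
    | some d =>
      cases PySem.List.pyGet? p 1 with
      | none => simp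
      | some a => by_cases hd : d == 0 <;> simp [hd] <;> ring

theorem pvGetD_of_pyGet? (p : List Int) (a : Int) (h : PySem.List.pyGet? p 1 = some a) :
    p.getD 1 0 = a := by
  have hb : PySem.List.pyGet? p 1 = p[1]? := by exact_mod_cast PySem.List.pyGet?_natCast p 1
  rw [List.getD_eq_getElem?_getD, hb.symm, h]
  rfl

theorem pvDvd_key (shift : List (List Int)) (n : Nat) (hn : 1 ≤ n)
    (hpos : ∀ p ∈ shift, 0 ≤ p.getD 1 0) :
    (n : ℤ) ∣ (pvAmtL n shift : ℤ) + pvNetSum shift := by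
  induction shift with
  | nil => simp [pvAmtL, pvNetSum]
  | cons p rest ih =>
    have hrest := ih (fun q hq => hpos q (List.mem_cons_of_mem p hq))
    have hp := hpos p (List.mem_cons_self ..)
    have hstep : (n : ℤ) ∣ (pvContrib n p : ℤ) +
        (match PySem.List.pyGet? p 0, PySem.List.pyGet? p 1 with
         | some d, some a => if d == 0 then -a else a
         | _, _ => 0) := by
      unfold pvContrib
      cases h0 : PySem.List.pyGet? p 0 with
      | none => simp
      | some d =>
        cases h1 : PySem.List.pyGet? p 1 with
        | none => simp
        | some a =>
          have ha : 0 ≤ a := by rw [← pvGetD_of_pyGet? p a h1]; exact hp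
          by_cases hd : d == 0
          · simp [hd, Int.toNat_of_nonneg ha]
          · simp only [hd, if_false, Bool.false_eq_true]
            refine ⟨a, ?_⟩
            push_cast [Int.toNat_of_nonneg ha, Nat.cast_sub hn]
            ring
    have hsum : (pvAmtL n (p :: rest) : ℤ) + pvNetSum (p :: rest) =
        ((pvContrib n p : ℤ) +
          (match PySem.List.pyGet? p 0, PySem.List.pyGet? p 1 with
           | some d, some a => if d == 0 then -a else a
           | _, _ => 0)) +
        ((pvAmtL n rest : ℤ) + pvNetSum rest) := by
      simp only [pvAmtL, pvNetSum, List.map_cons, List.sum_cons]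
      push_cast
      ring
    rw [hsum]
    exact dvd_add hstep hrest

-- ===== VERDICT (by name: the statement is the Claim_ definition above) =====
theorem stringShift_UsingAllShifts_spec : Claim_equal_stringShift_UsingAllShifts := by
  intro s shift _ hpre
  unfold Spec_stringShift_UsingAllShifts stringShift_UsingAllShifts stringShift_UsingAllShifts_alt
  by_cases hcs : s.toList = []
  · have hs : s = "" := by simpa using congrArg String.ofList hcs
    have h1 : List.foldl pvStepA s.toList shift = s.toList := by
      rw [pvFoldl_stepA, hcs]; simp
    rw [h1]
    subst hs
    simp
  · have hn : 1 ≤ s.toList.length := List.length_pos_iff.mpr hcs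
    have hamts : ∀ p ∈ shift, 0 ≤ p.getD 1 0 := fun p hp => (hpre p hp).2.1
    obtain ⟨q, hq⟩ := pvDvd_key shift s.toList.length hn hamts
    have hnet : pvNet shift = pvNetSum shift := by
      simpa using pvNet_foldl shift 0
    have hnz : (0 : Int) < (s.toList.length : Int) := by exact_mod_cast hn
    have hmod : PySem.Int.mod (pvNet shift) (s.toList.length : Int) =
        pvNet shift % (s.toList.length : Int) := PySem.Int.mod_eq_emod_of_pos hnz
    have hk0 : 0 ≤ pvNet shift % (s.toList.length : Int) :=
      Int.emod_nonneg _ (by omega)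
    have hklt : pvNet shift % (s.toList.length : Int) < s.toList.length :=
      Int.emod_lt_of_pos _ hnz
    have hdiv : (s.toList.length : Int) * (pvNet shift / s.toList.length) +
        pvNet shift % s.toList.length = pvNet shift := Int.mul_ediv_add_emod _ _
    have hkz : ((pvNet shift % (s.toList.length : Int)).toNat : Int) =
        pvNet shift % (s.toList.length : Int) := Int.toNat_of_nonneg hk0
    have hne : s.toList.isEmpty = false := by simp [hcs]
    have key : List.foldl pvStepA s.toList shift =
        List.drop (s.toList.length - (PySem.Int.mod (pvNet shift) (s.toList.length : Int)).toNat) s.toList ++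
        List.take (s.toList.length - (PySem.Int.mod (pvNet shift) (s.toList.length : Int)).toNat) s.toList := by
      rw [pvFoldl_stepA, hmod]
      rw [← List.rotate_eq_drop_append_take (by omega)]
      rw [← List.rotate_mod s.toList (pvAmtL s.toList.length shift),
          ← List.rotate_mod s.toList (s.toList.length - (pvNet shift % (s.toList.length : Int)).toNat)]
      congr 1
      -- both rotation counts are congruent to -(pvNet shift) modulo the length
      have hkle : (pvNet shift % (s.toList.length : Int)).toNat ≤ s.toList.length := by omega
      have hfloor : pvNet shift - pvNet shift % (s.toList.length : Int) =
          (s.toList.length : Int) * (pvNet shift / s.toList.length) := by linarith [hdiv]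
      have m1 : Int.ModEq (s.toList.length : Int) (pvAmtL s.toList.length shift) (-(pvNet shift)) := by
        apply Int.ModEq.symm
        rw [Int.modEq_iff_dvd]
        refine ⟨q, ?_⟩
        rw [hnet] at *
        linarith [hq]
      have m2 : Int.ModEq (s.toList.length : Int)
          ((s.toList.length : Int) - pvNet shift % (s.toList.length : Int)) (-(pvNet shift)) := by
        rw [Int.modEq_iff_dvd]
        refine ⟨-(pvNet shift / s.toList.length) - 1, ?_⟩
        rw [mul_sub, mul_neg, ← hfloor]
        ring
      have hint : (pvAmtL s.toList.length shift : Int) % s.toList.length =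
          ((s.toList.length : Int) - pvNet shift % (s.toList.length : Int)) % s.toList.length :=
        m1.trans m2.symm
      have hcast : ((pvAmtL s.toList.length shift % s.toList.length : Nat) : Int) =
          (((s.toList.length - (pvNet shift % (s.toList.length : Int)).toNat) % s.toList.length : Nat) : Int) := by
        push_cast [Nat.cast_sub hkle]
        rw [hkz]
        exact hint
      exact_mod_cast hcast
    rw [key]
    simp [hne]
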